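-- pv_equiv track=rewrite | github.com/mat0823/Triangulo_Sierpinsky | Tarea01_2019.py | ValidaEspacios
-- ===== SOURCE A (Python) =====
-- def ValidaEspacios(valor):
-- 	cont = 0
-- 	for i in range(len(valor)):
-- 		if(valor[i] == ' '):
-- 			cont += 1
-- 	if(cont == len(valor)):
-- 		return True
-- 	else:
-- 		return False
-- ===== SOURCE B (Python) =====
-- def ValidaEspacios(valor):
-- 	return valor == ' ' * len(valor)
-- ===== Notes on version B (the rewrite author's own statement) =====
-- stated objective: simpler
-- what changed: Replaced the per-character counting loop and counter comparison with a single closed-form comparison against an equal-length all-spaces string.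
import Mathlib
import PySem

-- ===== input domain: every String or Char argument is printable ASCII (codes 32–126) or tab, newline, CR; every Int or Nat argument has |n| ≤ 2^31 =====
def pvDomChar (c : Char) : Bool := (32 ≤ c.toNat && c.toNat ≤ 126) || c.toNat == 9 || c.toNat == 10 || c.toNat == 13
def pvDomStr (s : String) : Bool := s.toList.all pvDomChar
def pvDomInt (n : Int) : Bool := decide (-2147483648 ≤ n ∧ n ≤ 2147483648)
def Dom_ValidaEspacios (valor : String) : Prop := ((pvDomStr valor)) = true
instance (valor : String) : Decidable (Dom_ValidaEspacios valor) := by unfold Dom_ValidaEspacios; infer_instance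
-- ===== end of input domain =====

-- B replaces A's per-character counting loop with one closed-form comparison against an equal-length all-spaces string (simpler).


-- ===== PORT A =====
-- the for-loop over the indices counting spaces, then the final equality test
def ValidaEspacios (valor : String) : Bool :=
  let cont : Nat := valor.toList.foldl (fun c ch => if ch = ' ' then c + 1 else c) 0
  if cont = valor.toList.length then true else false

-- ===== PORT B =====
-- valor == ' ' * len(valor)
def ValidaEspacios_alt (valor : String) : Bool :=
  decide (valor.toList = List.replicate valor.toList.length ' ')

-- ===== PRECONDITION & SPEC =====
def Spec_ValidaEspacios (valor : String) (out : Bool) : Prop := out = ValidaEspacios_alt valor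
instance (valor : String) (out : Bool) : Decidable (Spec_ValidaEspacios valor out) := by unfold Spec_ValidaEspacios; infer_instance

-- ===== CLAIM (what is proved, stated in full; the proofs are below) =====
def Claim_equal_ValidaEspacios : Prop := ∀ (valor : String), Dom_ValidaEspacios valor → Spec_ValidaEspacios valor (ValidaEspacios valor)

-- ===== LEMMAS AND PROOFS =====
theorem pv_foldl_count (l : List Char) (c : Nat) :
    l.foldl (fun c ch => if ch = ' ' then c + 1 else c) c
      = c + l.countP (fun ch => ch = ' ') := by
  induction l generalizing c with
  | nil => simp
  | cons h t ih =>
    simp only [List.foldl_cons, List.countP_cons, ih]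
    by_cases h' : h = ' ' <;> simp [h'] <;> omega

-- ===== VERDICT (by name: the statement is the Claim_ definition above) =====
theorem ValidaEspacios_spec : Claim_equal_ValidaEspacios := by
  intro valor _
  unfold Spec_ValidaEspacios ValidaEspacios ValidaEspacios_alt
  simp only [pv_foldl_count, Nat.zero_add]
  rcases Nat.lt_or_ge (valor.toList.countP (fun ch => ch = ' ')) valor.toList.length with h | h
  · rw [if_neg (Nat.ne_of_lt h)]
    symm
    simp only [decide_eq_false_iff_not]
    intro heq
    rw [heq] at h
    simp [List.countP_replicate] at h
  · have hle := List.countP_le_length (p := fun ch => decide (ch = ' ')) (l := valor.toList)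
    have heq : valor.toList.countP (fun ch => ch = ' ') = valor.toList.length := le_antisymm hle h
    rw [if_pos heq]
    symm
    rw [decide_eq_true_iff]
    have := (List.countP_eq_length (p := fun ch => decide (ch = ' ')) (l := valor.toList)).mp heq
    apply List.eq_replicate_of_mem
    intro b hb
    simpa using this b hb
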